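-- pv_equiv track=rewrite | github.com/rafern/aqasm | interpreter.py | oputil_add_twos
-- ===== SOURCE A (Python) =====
-- def oputil_add_twos(cpu, a, b, n):
--     # Adds the n-bit numbers a and b
--     carry = 0
--     result = 0
--     for i in range(0, n):
--         # Get bit of a and b
--         abit = (a >> i) & 1
--         bbit = (b >> i) & 1
--         # Get resulting bit
--         result |= (abit ^ bbit ^ carry) << i
--         # Update carry
--         carry = (bbit & carry) | (abit & carry) | (abit & bbit)
--     return result
-- ===== SOURCE B (Python) =====
-- def oputil_add_twos(cpu, a, b, n):
--     # Direct formula: the n-bit ripple-carry sum is just (a + b) reduced mod 2**n.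
--     return (a + b) % (1 << n)
-- ===== Notes on version B (the rewrite author's own statement) =====
-- stated objective: faster
-- what changed: Replaces the bit-by-bit ripple-carry loop with the closed form (a+b) % (1<<n).
-- outside the precondition, e.g. on oputil_add_twos(0, 1, 1, -2): A returns 0, B raises ValueError
import Mathlib
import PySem

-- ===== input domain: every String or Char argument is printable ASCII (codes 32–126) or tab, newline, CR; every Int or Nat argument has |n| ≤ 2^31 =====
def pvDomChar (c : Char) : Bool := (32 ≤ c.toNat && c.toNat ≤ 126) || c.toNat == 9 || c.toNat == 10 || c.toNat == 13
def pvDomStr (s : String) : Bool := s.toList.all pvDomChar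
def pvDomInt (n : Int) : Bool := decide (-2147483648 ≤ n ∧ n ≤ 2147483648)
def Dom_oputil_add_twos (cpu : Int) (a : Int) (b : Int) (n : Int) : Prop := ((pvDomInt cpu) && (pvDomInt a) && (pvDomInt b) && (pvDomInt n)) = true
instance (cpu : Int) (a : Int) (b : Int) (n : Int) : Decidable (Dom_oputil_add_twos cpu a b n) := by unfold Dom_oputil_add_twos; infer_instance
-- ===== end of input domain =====

-- B replaces A's bit-by-bit ripple-carry loop with the closed form (a+b) % (1<<n) (asymptotically faster).


-- ===== PORT A =====
-- one iteration of A's loop body; state = (carry, result); shifts use i.toNat (exact: i ranges over 0..n-1, all nonnegative)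
def addTwosStep (a b : Int) (st : Int × Int) (i : Int) : Int × Int :=
  let abit := PySem.Int.band (a >>> i.toNat) 1
  let bbit := PySem.Int.band (b >>> i.toNat) 1
  let result := PySem.Int.bor st.2 ((PySem.Int.bxor (PySem.Int.bxor abit bbit) st.1) <<< i.toNat)
  let carry := PySem.Int.bor (PySem.Int.bor (PySem.Int.band bbit st.1) (PySem.Int.band abit st.1)) (PySem.Int.band abit bbit)
  (carry, result)

def oputil_add_twos (cpu : Int) (a : Int) (b : Int) (n : Int) : Int :=
  ((PySem.List.pyRange 0 n 1).foldl (addTwosStep a b) (0, 0)).2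

-- ===== PORT B =====
def oputil_add_twos_alt (cpu : Int) (a : Int) (b : Int) (n : Int) : Int :=
  PySem.Int.mod (a + b) ((1 : Int) <<< n.toNat)

-- ===== PRECONDITION & SPEC =====
-- Pre_ excludes n < 0: there Python's `1 << n` in B raises ValueError (A returns 0, its loop being empty).
def Pre_oputil_add_twos (cpu : Int) (a : Int) (b : Int) (n : Int) : Prop := 0 ≤ n
instance (cpu : Int) (a : Int) (b : Int) (n : Int) : Decidable (Pre_oputil_add_twos cpu a b n) := by unfold Pre_oputil_add_twos; infer_instance
def pvWitness_oputil_add_twos : Int × Int × Int × Int := (0, -3, 5, 4)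
def Spec_oputil_add_twos (cpu : Int) (a : Int) (b : Int) (n : Int) (out : Int) : Prop := out = oputil_add_twos_alt cpu a b n
instance (cpu : Int) (a : Int) (b : Int) (n : Int) (out : Int) : Decidable (Spec_oputil_add_twos cpu a b n out) := by unfold Spec_oputil_add_twos; infer_instance

-- ===== CLAIM (what is proved, stated in full; the proofs are below) =====
def Claim_equal_oputil_add_twos : Prop := ∀ (cpu : Int) (a : Int) (b : Int) (n : Int), Dom_oputil_add_twos cpu a b n → Pre_oputil_add_twos cpu a b n → Spec_oputil_add_twos cpu a b n (oputil_add_twos cpu a b n)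

-- ===== LEMMAS AND PROOFS =====

-- A's loop invariant after k iterations: carry = (a%2^k + b%2^k)/2^k, result = (a+b)%2^k.
lemma addTwos_loop_inv (a b : Int) (k : Nat) :
    (PySem.List.pyRange 0 (k : Int) 1).foldl (addTwosStep a b) (0, 0) =
      ((a % 2 ^ k + b % 2 ^ k) / 2 ^ k, (a + b) % 2 ^ k) := by
  induction k with
  | zero =>
    rw [Nat.cast_zero, PySem.List.pyRange_one_eq_nil le_rfl]
    norm_num
  | succ k ih =>
    have hsplit : PySem.List.pyRange 0 ((k : Int) + 1) 1 =
        PySem.List.pyRange 0 (k : Int) 1 ++ [(k : Int)] :=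
      PySem.List.pyRange_one_succ_right (by positivity)
    rw [show ((k + 1 : Nat) : Int) = (k : Int) + 1 by push_cast; ring, hsplit,
        List.foldl_append, ih]
    have hP : (0 : Int) < 2 ^ k := by positivity
    set P : Int := 2 ^ k with hPdef
    have hshift : ∀ x : Int, PySem.Int.band (x >>> k) 1 = (x / P) % 2 := by
      intro x
      rw [PySem.Int.band_one,
          PySem.Int.mod_eq_emod_of_pos (by norm_num), Int.shiftRight_eq_div_pow]
      push_cast
      rfl
    simp only [List.foldl_cons, List.foldl_nil, addTwosStep, hshift, Int.toNat_natCast]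
    have h2P : (2 : Int) ^ (k + 1) = 2 * P := by rw [hPdef]; ring
    have hmod2 : ∀ z : Int, z % (2 * P) = ((z / P) % 2) * P + z % P := by
      intro z
      have e1 : P * (z / P) + z % P = z := Int.ediv_add_emod z P
      have e2 : 2 * (z / P / 2) + (z / P) % 2 = z / P := Int.ediv_add_emod (z / P) 2
      have h1 : z = (z / P / 2) * (2 * P) + (((z / P) % 2) * P + z % P) := by nlinarith
      have hz0 : 0 ≤ z % P := Int.emod_nonneg z (by omega)
      have hzP : z % P < P := Int.emod_lt_of_pos z hP
      have hm0 : 0 ≤ (z / P) % 2 := Int.emod_nonneg _ (by norm_num)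
      have hm2 : (z / P) % 2 < 2 := Int.emod_lt_of_pos _ (by norm_num)
      calc z % (2 * P) = ((z / P / 2) * (2 * P) + (((z / P) % 2) * P + z % P)) % (2 * P) := by
            rw [← h1]
        _ = (((z / P) % 2) * P + z % P) % (2 * P) := by
            rw [add_comm, Int.add_mul_emod_self_right]
        _ = ((z / P) % 2) * P + z % P := by
            apply Int.emod_eq_of_lt <;> nlinarith
    rw [h2P, hmod2 a, hmod2 b]
    set x := (a / P) % 2 with hx
    set y := (b / P) % 2 with hy
    set r := (a + b) % P with hr
    set c := (a % P + b % P) / P with hc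
    have hra : 0 ≤ a % P := Int.emod_nonneg a (by omega)
    have hraP : a % P < P := Int.emod_lt_of_pos a hP
    have hrb : 0 ≤ b % P := Int.emod_nonneg b (by omega)
    have hrbP : b % P < P := Int.emod_lt_of_pos b hP
    have hr0 : 0 ≤ r := Int.emod_nonneg _ (by omega)
    have hrP : r < P := Int.emod_lt_of_pos _ hP
    have hAB : a % P + b % P = c * P + r := by
      have e3 : (a % P + b % P) % P = (a + b) % P := (Int.add_emod a b P).symm
      have e4 := Int.ediv_add_emod (a % P + b % P) P
      rw [hc]; linarith [e3, e4, hr]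
    have hc01 : c = 0 ∨ c = 1 := by
      have h0 : 0 ≤ c := Int.ediv_nonneg (by omega) (by omega)
      have h1 : c < 2 := by rw [hc, Int.ediv_lt_iff_lt_mul hP]; omega
      omega
    have hx01 : x = 0 ∨ x = 1 := by
      have := Int.emod_nonneg (a / P) (by norm_num : (2:Int) ≠ 0)
      have := Int.emod_lt_of_pos (a / P) (by norm_num : (0:Int) < 2)
      omega
    have hy01 : y = 0 ∨ y = 1 := by
      have := Int.emod_nonneg (b / P) (by norm_num : (2:Int) ≠ 0)
      have := Int.emod_lt_of_pos (b / P) (by norm_num : (0:Int) < 2)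
      omega
    have hor0 : PySem.Int.bor r ((0:Int) <<< k) = r := by
      have h1 : ((0:Int) <<< k) = 0 := by rw [Int.shiftLeft_eq]; ring
      rw [h1, PySem.Int.bor_zero]
    have hor1 : PySem.Int.bor r ((1:Int) <<< k) = P + r := by
      have h1 : ((1:Int) <<< k) = P := by rw [Int.shiftLeft_eq]; ring
      rw [h1, PySem.Int.bor_of_nonneg hr0 (le_of_lt hP)]
      have hPt : P.toNat = 2 ^ k := by
        rw [hPdef]
        rfl
      have hrlt : r.toNat < 2 ^ k := by omega
      have h2 : 2 ^ k + r.toNat = 2 ^ k ||| r.toNat := by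
        simpa using Nat.two_pow_add_eq_or_of_lt hrlt 1
      rw [hPt, Nat.lor_comm, ← h2]
      push_cast [Int.toNat_of_nonneg hr0]
      rw [hPdef]
    have hqr : ∀ t : Int, 0 ≤ t → t < 4 →
        (r + t * P) / (2 * P) = t / 2 ∧ (r + t * P) % (2 * P) = (t % 2) * P + r := by
      intro t ht0 ht4
      have e5 := Int.ediv_add_emod t 2
      have hkey : r + t * P = ((t % 2) * P + r) + (2 * P) * (t / 2) := by nlinarith
      have hm0 : 0 ≤ t % 2 := Int.emod_nonneg t (by norm_num)
      have hm2 : t % 2 < 2 := Int.emod_lt_of_pos t (by norm_num)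
      constructor
      · rw [hkey, Int.add_mul_ediv_left _ _ (by omega : (2*P) ≠ 0),
            Int.ediv_eq_zero_of_lt (by nlinarith) (by nlinarith)]
        omega
      · rw [hkey, Int.add_mul_emod_self_left]
        apply Int.emod_eq_of_lt <;> nlinarith
    rcases hx01 with hx' | hx' <;> rcases hy01 with hy' | hy' <;> rcases hc01 with hc' | hc' <;>
      (rw [hc'] at hAB; rw [hx', hy', hc'])
    -- 8 cases: (x, y, c)
    · -- 0 0 0
      obtain ⟨hq, hm⟩ := hqr 0 (by norm_num) (by norm_num)
      have hS : (0:Int) * P + a % P + ((0:Int) * P + b % P) = r + 0 * P := by linarith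
      rw [Prod.mk.injEq]
      refine ⟨?_, ?_⟩
      · rw [hS, hq]; decide
      · rw [Int.add_emod a b, hmod2 a, hmod2 b, ← hx, ← hy, hx', hy', hS, hm,
            (show PySem.Int.bxor (PySem.Int.bxor (0:Int) 0) 0 = 0 by decide), hor0]
        norm_num
    · -- 0 0 1
      obtain ⟨hq, hm⟩ := hqr 1 (by norm_num) (by norm_num)
      have hS : (0:Int) * P + a % P + ((0:Int) * P + b % P) = r + 1 * P := by linarith
      rw [Prod.mk.injEq]
      refine ⟨?_, ?_⟩
      · rw [hS, hq]; decide
      · rw [Int.add_emod a b, hmod2 a, hmod2 b, ← hx, ← hy, hx', hy', hS, hm,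
            (show PySem.Int.bxor (PySem.Int.bxor (0:Int) 0) 1 = 1 by decide), hor1]
        norm_num
    · -- 0 1 0
      obtain ⟨hq, hm⟩ := hqr 1 (by norm_num) (by norm_num)
      have hS : (0:Int) * P + a % P + ((1:Int) * P + b % P) = r + 1 * P := by linarith
      rw [Prod.mk.injEq]
      refine ⟨?_, ?_⟩
      · rw [hS, hq]; decide
      · rw [Int.add_emod a b, hmod2 a, hmod2 b, ← hx, ← hy, hx', hy', hS, hm,
            (show PySem.Int.bxor (PySem.Int.bxor (0:Int) 1) 0 = 1 by decide), hor1]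
        norm_num
    · -- 0 1 1
      obtain ⟨hq, hm⟩ := hqr 2 (by norm_num) (by norm_num)
      have hS : (0:Int) * P + a % P + ((1:Int) * P + b % P) = r + 2 * P := by linarith
      rw [Prod.mk.injEq]
      refine ⟨?_, ?_⟩
      · rw [hS, hq]; decide
      · rw [Int.add_emod a b, hmod2 a, hmod2 b, ← hx, ← hy, hx', hy', hS, hm,
            (show PySem.Int.bxor (PySem.Int.bxor (0:Int) 1) 1 = 0 by decide), hor0]
        norm_num
    · -- 1 0 0
      obtain ⟨hq, hm⟩ := hqr 1 (by norm_num) (by norm_num)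
      have hS : (1:Int) * P + a % P + ((0:Int) * P + b % P) = r + 1 * P := by linarith
      rw [Prod.mk.injEq]
      refine ⟨?_, ?_⟩
      · rw [hS, hq]; decide
      · rw [Int.add_emod a b, hmod2 a, hmod2 b, ← hx, ← hy, hx', hy', hS, hm,
            (show PySem.Int.bxor (PySem.Int.bxor (1:Int) 0) 0 = 1 by decide), hor1]
        norm_num
    · -- 1 0 1
      obtain ⟨hq, hm⟩ := hqr 2 (by norm_num) (by norm_num)
      have hS : (1:Int) * P + a % P + ((0:Int) * P + b % P) = r + 2 * P := by linarith
      rw [Prod.mk.injEq]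
      refine ⟨?_, ?_⟩
      · rw [hS, hq]; decide
      · rw [Int.add_emod a b, hmod2 a, hmod2 b, ← hx, ← hy, hx', hy', hS, hm,
            (show PySem.Int.bxor (PySem.Int.bxor (1:Int) 0) 1 = 0 by decide), hor0]
        norm_num
    · -- 1 1 0
      obtain ⟨hq, hm⟩ := hqr 2 (by norm_num) (by norm_num)
      have hS : (1:Int) * P + a % P + ((1:Int) * P + b % P) = r + 2 * P := by linarith
      rw [Prod.mk.injEq]
      refine ⟨?_, ?_⟩
      · rw [hS, hq]; decide
      · rw [Int.add_emod a b, hmod2 a, hmod2 b, ← hx, ← hy, hx', hy', hS, hm,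
            (show PySem.Int.bxor (PySem.Int.bxor (1:Int) 1) 0 = 0 by decide), hor0]
        norm_num
    · -- 1 1 1
      obtain ⟨hq, hm⟩ := hqr 3 (by norm_num) (by norm_num)
      have hS : (1:Int) * P + a % P + ((1:Int) * P + b % P) = r + 3 * P := by linarith
      rw [Prod.mk.injEq]
      refine ⟨?_, ?_⟩
      · rw [hS, hq]; decide
      · rw [Int.add_emod a b, hmod2 a, hmod2 b, ← hx, ← hy, hx', hy', hS, hm,
            (show PySem.Int.bxor (PySem.Int.bxor (1:Int) 1) 1 = 1 by decide), hor1]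
        norm_num

-- ===== VERDICT (by name: the statement is the Claim_ definition above) =====
theorem oputil_add_twos_spec : Claim_equal_oputil_add_twos := by
  intro cpu a b n _ hn
  unfold Spec_oputil_add_twos oputil_add_twos oputil_add_twos_alt
  have hn' : n = ((n.toNat : Nat) : Int) := (Int.toNat_of_nonneg hn).symm
  rw [hn', addTwos_loop_inv a b n.toNat, Int.toNat_natCast]
  have h1 : ((1 : Int) <<< n.toNat) = 2 ^ n.toNat := by rw [Int.shiftLeft_eq]; ring
  rw [h1, PySem.Int.mod_eq_emod_of_pos (by positivity)]
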